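-- pv_equiv track=rewrite | github.com/habibzuhaer/my-prompts-site | full_main.py | three_touches
-- ===== SOURCE A (Python) =====
-- def three_touches(binary_series, lookback, spacing):
--     idxs=[i for i,v in enumerate(binary_series[-lookback:]) if v]
--     if len(idxs)<3: return False
--     cnt,last=1,idxs[0]
--     for i in idxs[1:]:
--         if i-last>=spacing:
--             cnt+=1; last=i
--             if cnt>=3: return True
--     return False
-- ===== SOURCE B (Python) =====
-- def three_touches(binary_series, lookback, spacing):
--     window = binary_series[-lookback:]
--
--     def find_from(pos):
--         for j, v in enumerate(window):
--             if j >= pos and v: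
--                 return j
--         return None
--
--     first = find_from(0)
--     if first is None:
--         return False
--     second = find_from(max(first + 1, first + spacing))
--     if second is None:
--         return False
--     return find_from(max(second + 1, second + spacing)) is not None
-- ===== Notes on version B (the rewrite author's own statement) =====
-- stated objective: alternative
-- what changed: Replaces A's two-phase 'collect all truthy indices, then greedily scan with a running counter and last pointer' with three staged searches: find the first touch, then search for a touch at index >= max(last+1, last+spacing), twice; no index list and no counter state.
import Mathlib
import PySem

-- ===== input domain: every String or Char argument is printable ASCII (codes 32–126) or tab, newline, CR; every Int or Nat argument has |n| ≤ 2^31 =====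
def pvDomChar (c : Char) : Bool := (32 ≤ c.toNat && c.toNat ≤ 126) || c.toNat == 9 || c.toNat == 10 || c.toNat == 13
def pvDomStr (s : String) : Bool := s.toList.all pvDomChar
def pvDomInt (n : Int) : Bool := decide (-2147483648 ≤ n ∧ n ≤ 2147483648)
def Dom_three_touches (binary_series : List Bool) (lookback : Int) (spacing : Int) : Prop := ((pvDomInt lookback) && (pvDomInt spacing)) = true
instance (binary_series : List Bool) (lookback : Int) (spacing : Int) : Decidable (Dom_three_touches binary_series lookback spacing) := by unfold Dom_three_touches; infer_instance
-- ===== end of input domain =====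

-- B replaces A's "collect all truthy indices, then greedily scan with a counter and last pointer"
-- with three staged searches for the next touch at index ≥ max(last+1, last+spacing) (objective: alternative).

-- ===== PORT A =====
-- the 'for i in idxs[1:]' loop of A, with its early 'return True'
def pvALoop (spacing : Int) : List Int → Int → Int → Bool
  | [], _, _ => false
  | i :: rest, cnt, last =>
    if spacing ≤ i - last then
      if 3 ≤ cnt + 1 then true else pvALoop spacing rest (cnt + 1) i
    else pvALoop spacing rest cnt last

def three_touches (binary_series : List Bool) (lookback : Int) (spacing : Int) : Bool :=
  let idxs := ((PySem.List.enumerate (PySem.List.slice binary_series (some (-lookback)) none) 0).filter (·.2)).map (·.1)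
  if idxs.length < 3 then false
  else
    match idxs with
    | [] => false             -- unreachable: length ≥ 3
    | h :: t => pvALoop spacing t 1 h

-- ===== PORT B =====
-- B's find_from: 'for j, v in enumerate(window): if j >= pos and v: return j' / 'return None'
def pvFindLoop (pos : Int) : List Bool → Int → Option Int
  | [], _ => none
  | v :: rest, j => if pos ≤ j ∧ v then some j else pvFindLoop pos rest (j + 1)

def three_touches_alt (binary_series : List Bool) (lookback : Int) (spacing : Int) : Bool :=
  let window := PySem.List.slice binary_series (some (-lookback)) none
  match pvFindLoop 0 window 0 with
  | none => false
  | some first =>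
    match pvFindLoop (max (first + 1) (first + spacing)) window 0 with
    | none => false
    | some second => (pvFindLoop (max (second + 1) (second + spacing)) window 0).isSome

-- ===== PRECONDITION & SPEC =====
def Spec_three_touches (binary_series : List Bool) (lookback : Int) (spacing : Int) (out : Bool) : Prop := out = three_touches_alt binary_series lookback spacing
instance (binary_series : List Bool) (lookback : Int) (spacing : Int) (out : Bool) : Decidable (Spec_three_touches binary_series lookback spacing out) := by unfold Spec_three_touches; infer_instance

-- ===== CLAIM (what is proved, stated in full; the proofs are below) =====
def Claim_equal_three_touches : Prop := ∀ (binary_series : List Bool) (lookback : Int) (spacing : Int), Dom_three_touches binary_series lookback spacing → Spec_three_touches binary_series lookback spacing (three_touches binary_series lookback spacing)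

-- ===== LEMMAS AND PROOFS =====

-- proof helper: the truthy indices of a window, counting from i
def pvTIdx : List Bool → Int → List Int
  | [], _ => []
  | v :: rest, i => if v then i :: pvTIdx rest (i + 1) else pvTIdx rest (i + 1)

theorem pvTIdx_eq (w : List Bool) (s : Int) :
    ((PySem.List.enumerate w s).filter (·.2)).map (·.1) = pvTIdx w s := by
  induction w generalizing s with
  | nil => simp [pvTIdx, PySem.List.enumerate_nil]
  | cons v rest ih =>
    simp only [PySem.List.enumerate_cons, List.filter_cons, pvTIdx]
    by_cases hv : v <;> simp [hv, ih]

theorem pvTIdx_lb (w : List Bool) (s : Int) : ∀ x ∈ pvTIdx w s, s ≤ x := by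
  induction w generalizing s with
  | nil => simp [pvTIdx]
  | cons v rest ih =>
    intro x hx
    by_cases hv : v
    · simp only [pvTIdx, hv, if_true, List.mem_cons] at hx
      rcases hx with rfl | hx
      · omega
      · have := ih (s + 1) x hx; omega
    · simp only [pvTIdx, hv, if_false] at hx
      have := ih (s + 1) x hx; omega

theorem pvTIdx_sorted (w : List Bool) (s : Int) : (pvTIdx w s).Pairwise (· < ·) := by
  induction w generalizing s with
  | nil => simp [pvTIdx]
  | cons v rest ih =>
    by_cases hv : v
    · simp only [pvTIdx, hv, if_true, List.pairwise_cons]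
      exact ⟨fun x hx => by have := pvTIdx_lb rest (s + 1) x hx; omega, ih (s + 1)⟩
    · simpa [pvTIdx, hv] using ih (s + 1)

-- pvFindLoop is find? over the truthy-index list
theorem pvFindLoop_eq (pos : Int) (w : List Bool) (j : Int) :
    pvFindLoop pos w j = (pvTIdx w j).find? (fun i => decide (pos ≤ i)) := by
  induction w generalizing j with
  | nil => simp [pvFindLoop, pvTIdx]
  | cons v rest ih =>
    by_cases hv : v
    · simp only [pvFindLoop, pvTIdx, hv, if_true, and_true, List.find?_cons]
      by_cases hp : pos ≤ j <;> simp [hp, ih]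
    · simp [pvFindLoop, pvTIdx, hv, ih]

theorem find?_congr' {α : Type} (l : List α) (p q : α → Bool)
    (h : ∀ a ∈ l, p a = q a) : l.find? p = l.find? q := by
  induction l with
  | nil => rfl
  | cons a t ih =>
    simp only [List.find?_cons, h a (List.mem_cons_self ..)]
    cases q a
    · exact ih fun x hx => h x (List.mem_cons_of_mem _ hx)
    · rfl

-- after the second touch, A returns true iff one more touch at distance ≥ spacing exists
theorem pvALoop_two (sp : Int) (rest : List Int) (i : Int) :
    pvALoop sp rest 2 i = (rest.find? (fun j => decide (sp ≤ j - i))).isSome := by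
  induction rest generalizing i with
  | nil => simp [pvALoop]
  | cons a t ih =>
    by_cases h : sp ≤ a - i
    · simp [pvALoop, h, List.find?_cons]
    · simp [pvALoop, h, List.find?_cons, ih]

theorem pvALoop_short (sp : Int) (idxs : List Int) (cnt l : Int)
    (h : (idxs.length : Int) + cnt < 3) : pvALoop sp idxs cnt l = false := by
  induction idxs generalizing cnt l with
  | nil => simp [pvALoop]
  | cons i rest ih =>
    simp only [List.length_cons] at h
    have hc : ¬ (3 : Int) ≤ cnt + 1 := by push_cast at h; omega
    simp only [pvALoop, hc, if_false]
    by_cases h1 : sp ≤ i - l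
    · simp only [h1, if_true]
      exact ih (cnt + 1) i (by push_cast at h ⊢; omega)
    · simp only [h1, if_false]
      exact ih cnt l (by push_cast at h ⊢; omega)

-- the greedy loop of A equals the staged-search form of B, on a sorted list above `last`
theorem pvA_chain (sp : Int) (t : List Int) (last : Int)
    (hs : t.Pairwise (· < ·)) (hgt : ∀ x ∈ t, last < x) :
    pvALoop sp t 1 last =
      match t.find? (fun i => decide (max (last + 1) (last + sp) ≤ i)) with
      | none => false
      | some i => (t.find? (fun j => decide (max (i + 1) (i + sp) ≤ j))).isSome := by
  induction t generalizing last with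
  | nil => simp [pvALoop]
  | cons i rest ih =>
    have hi : last < i := hgt i (List.mem_cons_self ..)
    have hrest : ∀ x ∈ rest, i < x := (List.pairwise_cons.mp hs).1
    by_cases c1 : sp ≤ i - last
    · have hp1 : (decide (max (last + 1) (last + sp) ≤ i)) = true := by
        simp only [decide_eq_true_eq]; omega
      simp only [List.find?_cons, hp1]
      have hpii : (decide (max (i + 1) (i + sp) ≤ i)) = false := by
        simp only [decide_eq_false_iff_not]; omega
      simp only [hpii, pvALoop, c1, if_true]
      norm_num
      rw [pvALoop_two]
      apply congrArg
      exact find?_congr' rest _ _ fun x hx => by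
        have := hrest x hx
        simp only [decide_eq_decide]; omega
    · have hp1 : (decide (max (last + 1) (last + sp) ≤ i)) = false := by
        simp only [decide_eq_false_iff_not]; omega
      simp only [List.find?_cons, hp1, pvALoop, c1, if_false]
      rw [ih last (List.pairwise_cons.mp hs).2 (fun x hx => hgt x (List.mem_cons_of_mem _ hx))]
      cases hf : rest.find? (fun i => decide (max (last + 1) (last + sp) ≤ i)) with
      | none => rfl
      | some jj =>
        have hjj : i < jj := hrest jj (List.mem_of_find?_eq_some hf)
        have : (decide (jj + max 1 sp ≤ i)) = false := by
          simp only [decide_eq_false_iff_not]; omega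
        simp [this]

-- B in terms of the truthy-index list and A's loop
theorem alt_char (bs : List Bool) (lb sp : Int) :
    three_touches_alt bs lb sp =
      (match pvTIdx (PySem.List.slice bs (some (-lb)) none) 0 with
       | [] => false
       | h :: t => pvALoop sp t 1 h) := by
  unfold three_touches_alt
  simp only [pvFindLoop_eq]
  cases hL : pvTIdx (PySem.List.slice bs (some (-lb)) none) 0 with
  | nil => simp
  | cons h t =>
    have h0 : (0 : Int) ≤ h := pvTIdx_lb _ _ h (hL ▸ List.mem_cons_self ..)
    have hsorted := hL ▸ pvTIdx_sorted (PySem.List.slice bs (some (-lb)) none) 0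
    have hgt : ∀ x ∈ t, h < x := (List.pairwise_cons.mp hsorted).1
    have hts : t.Pairwise (· < ·) := (List.pairwise_cons.mp hsorted).2
    have hfst : (decide ((0 : Int) ≤ h)) = true := by simpa using h0
    simp only [List.find?_cons, hfst]
    have hph : (decide (max (h + 1) (h + sp) ≤ h)) = false := by
      simp only [decide_eq_false_iff_not]; omega
    simp only [hph]
    rw [pvA_chain sp t h hts hgt]
    cases hf : t.find? (fun i => decide (max (h + 1) (h + sp) ≤ i)) with
    | none => rfl
    | some i =>
      have hhi : h < i := hgt i (List.mem_of_find?_eq_some hf)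
      have : (decide (i + max 1 sp ≤ h)) = false := by
        simp only [decide_eq_false_iff_not]; omega
      simp [this]

-- ===== VERDICT (by name: the statement is the Claim_ definition above) =====
theorem three_touches_spec : Claim_equal_three_touches := by
  intro bs lookback spacing _
  unfold Spec_three_touches three_touches
  rw [pvTIdx_eq, alt_char]
  cases hT : pvTIdx (PySem.List.slice bs (some (-lookback)) none) 0 with
  | nil => simp
  | cons h t =>
    by_cases hlen : (h :: t).length < 3
    · simp only [hlen, if_true]
      exact (pvALoop_short spacing t 1 h (by simp at hlen ⊢; omega)).symm
    · rw [if_neg hlen]
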